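-- pv_equiv track=rewrite | github.com/TimerErTim/obsidian-gource-vis-jj | src/__main__.py | tags_only_paths
-- ===== SOURCE A (Python) =====
-- def tags_only_paths(pairs: list[tuple[str | None, list[str] | None]]) -> set[str]:
--     paths = set()
--     for path, tags in pairs:
--         if tags is not None and len(tags) > 0:
--             paths.update({
--                 f"{tag}.md" for tag in tags
--             })
--         elif path is not None:
--             paths.add(path)
--     return paths
-- ===== SOURCE B (Python) =====
-- def tags_only_paths(pairs: list[tuple[str | None, list[str] | None]]) -> set[str]:
--     # Divide and conquer: split the list in half, solve each half, union the results.
--     if len(pairs) <= 1: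
--         if not pairs:
--             return set()
--         path, tags = pairs[0]
--         if tags:
--             return {f"{tag}.md" for tag in tags}
--         return {path} if path is not None else set()
--     mid = len(pairs) // 2
--     return tags_only_paths(pairs[:mid]) | tags_only_paths(pairs[mid:])
-- ===== Notes on version B (the rewrite author's own statement) =====
-- stated objective: alternative
-- what changed: Replaced A's single left-to-right loop mutating one set with a divide-and-conquer recursion: split the pair list in half, compute each half's set independently, and combine with set union (correct because set union is associative over the concatenation of the halves).
import Mathlib
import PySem

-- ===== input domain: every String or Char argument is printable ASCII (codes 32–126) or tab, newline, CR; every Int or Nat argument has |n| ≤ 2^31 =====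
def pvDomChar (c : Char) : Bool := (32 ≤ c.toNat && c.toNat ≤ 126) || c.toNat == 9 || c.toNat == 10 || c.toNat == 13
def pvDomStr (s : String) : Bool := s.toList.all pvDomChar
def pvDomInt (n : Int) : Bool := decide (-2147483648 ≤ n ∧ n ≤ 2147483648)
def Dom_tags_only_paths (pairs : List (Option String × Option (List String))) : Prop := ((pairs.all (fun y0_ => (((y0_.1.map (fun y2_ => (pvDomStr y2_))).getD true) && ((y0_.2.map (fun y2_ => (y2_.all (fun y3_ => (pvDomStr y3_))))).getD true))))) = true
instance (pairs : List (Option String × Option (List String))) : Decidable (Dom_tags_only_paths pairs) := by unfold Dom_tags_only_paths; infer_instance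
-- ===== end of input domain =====

-- B replaces A's single accumulating loop by a divide-and-conquer recursion: solve each half of the list and combine with set union (alternative decomposition, same cost class).


-- ===== PORT A =====
def tags_only_paths (pairs : List (Option String × Option (List String))) : List String :=
  pairs.foldl (fun paths pr =>
    match pr.2 with
    | some (t :: ts) =>
        PySem.Set.update paths (PySem.Set.ofList ((t :: ts).map (fun tag => tag ++ ".md")))
    | _ =>
        match pr.1 with
        | some p => PySem.Set.add paths p
        | none => paths) []

-- ===== PORT B =====
-- pairs[:mid] / pairs[mid:] with 0 ≤ mid ≤ len are exactly take/drop (PySem.List.slice_to/slice_from)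
def tags_only_paths_alt (pairs : List (Option String × Option (List String))) : List String :=
  if _h : pairs.length ≤ 1 then
    match pairs with
    | [] => []
    | pr :: _ =>
      -- 'if tags:' is Python truthiness: tags is not None and nonempty
      let ts := pr.2.getD []
      if ts.isEmpty then (pr.1.map (fun p => PySem.Set.ofList [p])).getD []
      else PySem.Set.ofList (ts.map (fun tag => tag ++ ".md"))
  else
    PySem.Set.union (tags_only_paths_alt (pairs.take (pairs.length / 2)))
                    (tags_only_paths_alt (pairs.drop (pairs.length / 2)))
termination_by pairs.length
decreasing_by
  · simp only [List.length_take]; omega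
  · simp only [List.length_drop]; omega

-- ===== PRECONDITION & SPEC =====
def Spec_tags_only_paths (pairs : List (Option String × Option (List String))) (out : List String) : Prop := out = tags_only_paths_alt pairs
instance (pairs : List (Option String × Option (List String))) (out : List String) : Decidable (Spec_tags_only_paths pairs out) := by unfold Spec_tags_only_paths; infer_instance

-- ===== CLAIM =====
def Claim_equal_tags_only_paths : Prop := ∀ (pairs : List (Option String × Option (List String))), Dom_tags_only_paths pairs → Spec_tags_only_paths pairs (tags_only_paths pairs)

-- ===== LEMMAS AND PROOFS =====

-- per-pair contribution, used only to state the common normal form of both ports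
def tagsContrib (pr : Option String × Option (List String)) : List String :=
  match pr.2 with
  | some (t :: ts) => (t :: ts).map (fun tag => tag ++ ".md")
  | _ =>
    match pr.1 with
    | some p => [p]
    | none => []

theorem update_ofList {α : Type} [BEq α] [LawfulBEq α]
    (s l : List α) : PySem.Set.update s (PySem.Set.ofList l) = PySem.Set.update s l := by
  rw [PySem.Set.update_eq_append_filter, PySem.Set.update_eq_append_filter,
      PySem.Set.ofList_ofList]

theorem step_eq_update (paths : List String) (pr : Option String × Option (List String)) :
    (match pr.2 with
     | some (t :: ts) =>
         PySem.Set.update paths (PySem.Set.ofList ((t :: ts).map (fun tag => tag ++ ".md")))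
     | _ =>
         match pr.1 with
         | some p => PySem.Set.add paths p
         | none => paths)
    = PySem.Set.update paths (tagsContrib pr) := by
  rcases pr with ⟨path, tags⟩
  match tags with
  | some (t :: ts) => simp [tagsContrib, update_ofList]
  | some [] | none =>
    match path with
    | some p => simp [tagsContrib, PySem.Set.update_cons, PySem.Set.update_nil]
    | none => simp [tagsContrib, PySem.Set.update_nil]

theorem foldl_update_flatMap (pairs : List (Option String × Option (List String)))
    (s : List String) :
    pairs.foldl (fun paths pr => PySem.Set.update paths (tagsContrib pr)) s
    = PySem.Set.update s (pairs.flatMap tagsContrib) := by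
  induction pairs generalizing s with
  | nil => simp [PySem.Set.update_nil]
  | cons p ps ih =>
    simp only [List.foldl_cons, List.flatMap_cons, ih, PySem.Set.update_append]

theorem a_eq_norm (pairs : List (Option String × Option (List String))) :
    tags_only_paths pairs = PySem.Set.ofList (pairs.flatMap tagsContrib) := by
  unfold tags_only_paths
  have : (fun (paths : List String) (pr : Option String × Option (List String)) =>
      match pr.2 with
      | some (t :: ts) =>
          PySem.Set.update paths (PySem.Set.ofList ((t :: ts).map (fun tag => tag ++ ".md")))
      | _ =>
          match pr.1 with
          | some p => PySem.Set.add paths p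
          | none => paths)
      = fun paths pr => PySem.Set.update paths (tagsContrib pr) := by
    funext paths pr; exact step_eq_update paths pr
  rw [this, foldl_update_flatMap, PySem.Set.update_nil_left]

theorem union_norm (xs ys : List (Option String × Option (List String))) :
    PySem.Set.union (PySem.Set.ofList (xs.flatMap tagsContrib))
                    (PySem.Set.ofList (ys.flatMap tagsContrib))
    = PySem.Set.ofList ((xs ++ ys).flatMap tagsContrib) := by
  rw [PySem.Set.union_eq_update, update_ofList, List.flatMap_append,
      PySem.Set.ofList_append]

theorem b_eq_norm (pairs : List (Option String × Option (List String))) :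
    tags_only_paths_alt pairs = PySem.Set.ofList (pairs.flatMap tagsContrib) := by
  induction hn : pairs.length using Nat.strong_induction_on generalizing pairs with
  | _ n ih =>
  by_cases h : pairs.length ≤ 1
  · match pairs, h with
    | [], _ => simp [tags_only_paths_alt]
    | [pr], _ =>
      rcases pr with ⟨path, tags⟩
      match tags with
      | some (t :: ts) => simp [tags_only_paths_alt, tagsContrib]
      | some [] | none =>
        match path with
        | some p => simp [tags_only_paths_alt, tagsContrib]
        | none => simp [tags_only_paths_alt, tagsContrib]
      
    | _ :: _ :: _, h => simp at h
  · rw [tags_only_paths_alt]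
    simp only [h, dite_false]
    rw [ih (pairs.take (pairs.length / 2)).length (by simp; omega) _ rfl,
        ih (pairs.drop (pairs.length / 2)).length (by simp; omega) _ rfl,
        union_norm, List.take_append_drop]

-- ===== VERDICT =====
theorem tags_only_paths_spec : Claim_equal_tags_only_paths := by
  intro pairs _
  show tags_only_paths pairs = tags_only_paths_alt pairs
  rw [a_eq_norm, b_eq_norm]
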